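-- pv_equiv track=rewrite | github.com/Kyle-Kerlew/Competitive-Programming-Problems | borze_1.py | decode_borze
-- ===== SOURCE A (Python) =====
-- def decode_borze(string, curr_symbol, index, result=""):
--     if curr_symbol == ".":
--         result += "0"
--         curr_symbol = ""
--     elif curr_symbol == "-.":
--         result += "1"
--         curr_symbol = ""
--     elif curr_symbol == "--":
--         result += "2"
--         curr_symbol = ""
--
--     if index == len(string):
--         return result
--     curr_symbol += string[index]
--     return decode_borze(string, curr_symbol, index + 1, result)
-- ===== SOURCE B (Python) =====
-- CODES = {".": "0", "-.": "1", "--": "2"}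
--
--
-- def decode_borze(string, curr_symbol, index, result=""):
--     # Iterative table-driven version of the same check-then-consume automaton:
--     # flush a completed code via one dict lookup, then consume the next char.
--     while True:
--         digit = CODES.get(curr_symbol)
--         if digit is not None:
--             result += digit
--             curr_symbol = ""
--         if index == len(string):
--             return result
--         curr_symbol += string[index]
--         index += 1
-- ===== Notes on version B (the rewrite author's own statement) =====
-- stated objective: alternative
-- what changed: Replaced A's tail recursion (a fresh call per character, with an elif chain re-testing the buffer) by a single while-True loop over an explicit (buffer,index,result) state whose flush step is one lookup in a code table, so no call stack is built (A can hit RecursionError on long inputs).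
import Mathlib
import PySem

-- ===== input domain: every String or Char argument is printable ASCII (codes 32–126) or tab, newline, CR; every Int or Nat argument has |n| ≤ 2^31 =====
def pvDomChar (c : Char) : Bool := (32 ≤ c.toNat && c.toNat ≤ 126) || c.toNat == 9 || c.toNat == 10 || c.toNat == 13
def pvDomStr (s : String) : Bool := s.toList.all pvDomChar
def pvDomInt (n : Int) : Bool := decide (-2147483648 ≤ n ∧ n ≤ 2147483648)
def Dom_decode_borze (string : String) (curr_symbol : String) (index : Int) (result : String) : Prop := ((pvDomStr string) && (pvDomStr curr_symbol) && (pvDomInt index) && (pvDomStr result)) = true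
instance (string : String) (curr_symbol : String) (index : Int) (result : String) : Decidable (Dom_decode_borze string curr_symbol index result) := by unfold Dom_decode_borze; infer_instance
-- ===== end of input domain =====

-- B replaces A's tail recursion by one explicit loop with a code-table flush step: same
-- return value everywhere A returns; no claim beyond the theorems below.

-- ===== PORT A =====
-- Literal port of A's tail recursion; where Python raises IndexError (index out of
-- range) the match's none-branch returns early — those inputs are excluded by Pre_.
-- A's initial elif chain (new buffer, new result)
def pvFlushA (curr_symbol result : String) : String × String :=
  if curr_symbol = "." then ("", result ++ "0")
  else if curr_symbol = "-." then ("", result ++ "1")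
  else if curr_symbol = "--" then ("", result ++ "2")
  else (curr_symbol, result)

def decode_borze (string : String) (curr_symbol : String) (index : Int) (result : String) : String :=
  let p := pvFlushA curr_symbol result
  if index = PySem.Str.len string then p.2
  else
    match h : PySem.Str.pyGet? string index with
    | none => p.2   -- Python: IndexError (outside Pre_)
    | some c => decode_borze string (p.1.push c) (index + 1) p.2
termination_by (PySem.Str.len string - index).toNat
decreasing_by
  simp only [PySem.Str.pyGet?] at h
  have hr : PySem.Raise.InRange string.toList.length index := by
    by_contra hn
    rw [← PySem.List.pyGet?_eq_none_iff] at hn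
    simp [hn] at h
  simp [PySem.Raise.InRange, PySem.Str.len] at *
  omega

-- ===== PORT B =====
-- the module-level dict CODES of Source B
def pvCODES : PySem.Dict String String :=
  PySem.Dict.ofList [(".", "0"), ("-.", "1"), ("--", "2")]

-- the while-True loop of Source B over the mutable state (curr_symbol, index, result)
-- Source B's flush step: one table lookup
def pvFlushB (curr_symbol result : String) : String × String :=
  match PySem.Dict.get? pvCODES curr_symbol with
  | some digit => ("", result ++ digit)
  | none => (curr_symbol, result)

def pvBorzeLoop (string : String) (st : String × Int × String) : String :=
  let (curr_symbol, index, result) := st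
  let p := pvFlushB curr_symbol result
  if index = PySem.Str.len string then p.2
  else
    match h : PySem.Str.pyGet? string index with
    | none => p.2   -- Python: IndexError (outside Pre_)
    | some c => pvBorzeLoop string (p.1.push c, index + 1, p.2)
termination_by (PySem.Str.len string - st.2.1).toNat
decreasing_by
  simp only [PySem.Str.pyGet?] at h
  have hr : PySem.Raise.InRange string.toList.length index := by
    by_contra hn
    rw [← PySem.List.pyGet?_eq_none_iff] at hn
    simp [hn] at h
  simp [PySem.Raise.InRange, PySem.Str.len] at *
  omega

def decode_borze_alt (string : String) (curr_symbol : String) (index : Int) (result : String) : String :=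
  pvBorzeLoop string (curr_symbol, index, result)

-- ===== PRECONDITION & SPEC =====
-- Pre_: exactly the inputs on which the Python A returns (outside it string[index]
-- raises IndexError, immediately or after the buffer flush).
def Pre_decode_borze (string : String) (curr_symbol : String) (index : Int) (result : String) : Prop :=
  -(PySem.Str.len string) ≤ index ∧ index ≤ PySem.Str.len string
instance (string : String) (curr_symbol : String) (index : Int) (result : String) : Decidable (Pre_decode_borze string curr_symbol index result) := by unfold Pre_decode_borze; infer_instance

def pvWitness_decode_borze : String × String × Int × String := (".--.", "", 0, "")

def Spec_decode_borze (string : String) (curr_symbol : String) (index : Int) (result : String) (out : String) : Prop := out = decode_borze_alt string curr_symbol index result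
instance (string : String) (curr_symbol : String) (index : Int) (result : String) (out : String) : Decidable (Spec_decode_borze string curr_symbol index result out) := by unfold Spec_decode_borze; infer_instance

-- ===== CLAIM (what is proved, stated in full; the proofs are below) =====
def Claim_equal_decode_borze : Prop := ∀ (string : String) (curr_symbol : String) (index : Int) (result : String), Dom_decode_borze string curr_symbol index result → Pre_decode_borze string curr_symbol index result → Spec_decode_borze string curr_symbol index result (decode_borze string curr_symbol index result)

-- ===== LEMMAS AND PROOFS =====

-- B's table lookup is A's elif chain.
theorem pvCODES_items :
    pvCODES = PySem.Dict.mk [(".", "0"), ("-.", "1"), ("--", "2")] := by decide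

-- B's flush (table lookup) is A's flush (elif chain).
theorem pvFlush_eq (cur r : String) : pvFlushB cur r = pvFlushA cur r := by
  rw [pvFlushB, pvFlushA, pvCODES_items, PySem.Dict.get?_mk_cons, PySem.Dict.get?_mk_cons,
    PySem.Dict.get?_mk_cons]
  simp only [beq_iff_eq]
  by_cases h1 : "." = cur
  · subst h1; rfl
  rw [if_neg h1]
  by_cases h2 : "-." = cur
  · subst h2; rfl
  rw [if_neg h2]
  by_cases h3 : "--" = cur
  · subst h3; rfl
  rw [if_neg h3, PySem.Dict.get?, if_neg (fun h => h1 h.symm), if_neg (fun h => h2 h.symm),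
    if_neg (fun h => h3 h.symm)]
  rfl

-- the two recursions agree on every input (no precondition needed)
theorem pvLoop_eq (string curr_symbol : String) (index : Int) (result : String) :
    pvBorzeLoop string (curr_symbol, index, result) = decode_borze string curr_symbol index result := by
  fun_induction decode_borze string curr_symbol index result with
  | _ =>
    rw [pvBorzeLoop]
    simp_all only [pvFlush_eq, if_false]
    first
      | rfl
      | (split <;> simp_all) <;> try (first | rfl | assumption)

-- ===== VERDICT (by name: the statement is the Claim_ definition above) =====
theorem decode_borze_spec : Claim_equal_decode_borze := by
  intro string curr_symbol index result _ _
  exact (pvLoop_eq string curr_symbol index result).symm
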